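-- pv_equiv track=rewrite | github.com/jinleiphys/svm | gui/wizard_steps/review_step.py | _annotate_pot
-- ===== SOURCE A (Python) =====
-- def _annotate_pot(content: str) -> str:
--     """为pot.inp添加行注释"""
--     lines = content.strip().split('\n')
--     annotations = [
--         "# 势能类型 (1=中心力, 2=张量, 3=自旋-轨道)",
--         "# 势能选项参数",
--     ]
--
--     result = []
--     for i, line in enumerate(lines):
--         if i < len(annotations):
--             result.append(f"{line:40s} {annotations[i]}")
--         else:
--             result.append(line)
--
--     return '\n'.join(result)
-- ===== SOURCE B (Python) =====
-- def _annotate_pot(content: str) -> str: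
--     """为pot.inp添加行注释"""
--     annotations = [
--         "# 势能类型 (1=中心力, 2=张量, 3=自旋-轨道)",
--         "# 势能选项参数",
--     ]
--
--     def go(text, anns):
--         if not anns:
--             return text
--         head, sep, rest = text.partition('\n')
--         line = f"{head:40s} {anns[0]}"
--         if not sep:
--             return line
--         return line + '\n' + go(rest, anns[1:])
--
--     return go(content.strip(), annotations)
-- ===== Notes on version B (the rewrite author's own statement) =====
-- stated objective: alternative
-- what changed: B never builds the list of lines: it recurses over the annotations, peeling one line at a time off the raw string with str.partition at the first newline and returning the remaining tail verbatim as one unsplit substring, instead of A's split-into-list, indexed loop with a bound check, and re-join.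
import Mathlib
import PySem

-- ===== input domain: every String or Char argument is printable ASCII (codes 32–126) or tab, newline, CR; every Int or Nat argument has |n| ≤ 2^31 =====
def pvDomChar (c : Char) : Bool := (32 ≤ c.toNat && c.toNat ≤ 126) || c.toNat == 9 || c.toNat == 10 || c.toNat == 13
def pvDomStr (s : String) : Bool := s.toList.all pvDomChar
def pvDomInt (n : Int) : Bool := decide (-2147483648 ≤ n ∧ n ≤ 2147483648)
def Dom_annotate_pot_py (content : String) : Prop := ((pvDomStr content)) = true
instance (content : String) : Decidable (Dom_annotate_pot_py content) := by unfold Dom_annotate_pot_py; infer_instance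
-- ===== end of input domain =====

-- B recurses over the annotations, peeling one line at a time off the raw string with
-- str.partition at the first newline and returning the remaining tail verbatim as one
-- unsplit substring, instead of A's split-into-list, indexed loop with a bound check, and re-join.


-- the annotation constants (module literals, shared by both Pythons)
def pvAnnotations : List String :=
  ["# 势能类型 (1=中心力, 2=张量, 3=自旋-轨道)", "# 势能选项参数"]

-- f"{line:40s} {ann}" on code points (hand port, exact: Python's str format width counts
-- code points; a line of ≥ 40 code points is left unpadded, as '40 - length' clamps at 0)
def pvFmtL (line ann : List Char) : List Char :=
  line ++ List.replicate (40 - line.length) ' ' ++ ' ' :: ann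

def pvFmt (line ann : String) : String := String.ofList (pvFmtL line.toList ann.toList)

-- ===== PORT A =====
def annotate_pot_py (content : String) : String :=
  let lines := (PySem.Str.split? (PySem.Str.strip content) "\n").getD []  -- sep is the nonempty literal "\n", so split? is always some
  let annotations := pvAnnotations
  let result := (PySem.List.enumerate lines 0).foldl
    (fun (res : List String) (p : Int × String) =>
      if p.1 < (annotations.length : Int) then
        res ++ [pvFmt p.2 (PySem.List.pyGetD annotations p.1 "")]
      else
        res ++ [p.2]) []
  PySem.Str.join "\n" result

-- ===== PORT B =====
-- text.partition('\n') (hand port, exact for the single-char separator):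
-- none = no '\n' in text (Python's ('text', '', '')), some (h, t) = (h, '\n', t)
def pvPartNl : List Char → Option (List Char × List Char)
  | [] => none
  | c :: cs =>
    if c = '\n' then some ([], cs)
    else
      match pvPartNl cs with
      | none => none
      | some (h, t) => some (c :: h, t)

-- the inner 'go(text, anns)': recursion over the annotations, tail returned verbatim
def pvGo : List Char → List String → List Char
  | text, [] => text
  | text, a :: rest =>
    match pvPartNl text with
    | none => pvFmtL text a.toList
    | some (h, t) => pvFmtL h a.toList ++ '\n' :: pvGo t rest

def annotate_pot_py_alt (content : String) : String :=
  String.ofList (pvGo (PySem.Str.strip content).toList pvAnnotations)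

-- ===== PRECONDITION & SPEC =====
def Spec_annotate_pot_py (content : String) (out : String) : Prop := out = annotate_pot_py_alt content
instance (content : String) (out : String) : Decidable (Spec_annotate_pot_py content out) := by unfold Spec_annotate_pot_py; infer_instance

-- ===== CLAIM =====
def Claim_equal_annotate_pot_py : Prop := ∀ (content : String), Dom_annotate_pot_py content → Spec_annotate_pot_py content (annotate_pot_py content)

-- ===== LEMMAS AND PROOFS =====

-- pvPartNl decomposes its input at the first '\n'
theorem pvPartNl_some {cs h t : List Char} (hp : pvPartNl cs = some (h, t)) :
    cs = h ++ '\n' :: t := by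
  induction cs generalizing h t with
  | nil => simp [pvPartNl] at hp
  | cons c rest ih =>
    by_cases hc : c = '\n'
    · simp [pvPartNl, hc] at hp
      simp [hc, hp.1, hp.2]
    · rw [pvPartNl, if_neg hc] at hp
      cases hpr : pvPartNl rest with
      | none => rw [hpr] at hp; simp at hp
      | some p =>
        rw [hpr] at hp
        simp at hp
        obtain ⟨rfl, rfl⟩ := hp
        simp [ih hpr]

theorem pvPartNl_some_length {cs h t : List Char} (hp : pvPartNl cs = some (h, t)) :
    t.length < cs.length := by
  have := pvPartNl_some hp; subst this; simp; omega

-- full split of a string at every '\n', by repeated partition (proof-side helper)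
def pvSplit (cs : List Char) : List (List Char) :=
  match hp : pvPartNl cs with
  | none => [cs]
  | some (h, t) => h :: pvSplit t
termination_by cs.length
decreasing_by exact pvPartNl_some_length hp

theorem pvSplit_ne_nil (cs : List Char) : pvSplit cs ≠ [] := by
  rw [pvSplit]
  cases hp : pvPartNl cs with
  | none => simp
  | some p => simp

-- prepend onto the first piece
def pvConsHead (pre : List Char) : List (List Char) → List (List Char)
  | [] => [pre]
  | x :: xs => (pre ++ x) :: xs

theorem pvSplit_eq_none {cs : List Char} (hp : pvPartNl cs = none) : pvSplit cs = [cs] := by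
  rw [pvSplit]; split <;> simp_all

theorem pvSplit_eq_some {cs h t : List Char} (hp : pvPartNl cs = some (h, t)) :
    pvSplit cs = h :: pvSplit t := by
  rw [pvSplit]; split <;> simp_all

-- PySem's splitOn loop computes pvSplit (invariant of splitOn.go for the separator ['\n'])
theorem pv_go_eq (fuel : Nat) : ∀ (l cur : List Char) (acc : List (List Char)),
    l.length ≤ fuel →
    PySem.Chars.splitOn.go ['\n'] fuel l cur acc =
      acc.reverse ++ pvConsHead cur.reverse (pvSplit l) := by
  induction fuel with
  | zero =>
    intro l cur acc hl
    have : l = [] := by cases l <;> simp_all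
    subst this
    rw [pvSplit_eq_none (by simp [pvPartNl])]
    simp [PySem.Chars.splitOn.go, pvConsHead]
  | succ f ih =>
    intro l cur acc hl
    cases l with
    | nil =>
      rw [pvSplit_eq_none (by simp [pvPartNl])]
      simp [PySem.Chars.splitOn.go, pvConsHead]
    | cons c rest =>
      by_cases hc : c = '\n'
      · subst hc
        rw [PySem.Chars.splitOn.go]
        have hpre : List.isPrefixOf ['\n'] ('\n' :: rest) = true := by
          simp [List.isPrefixOf]
        rw [if_pos hpre]
        have hd : List.drop ['\n'].length ('\n' :: rest) = rest := rfl
        rw [hd]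
        simp only [List.length_cons] at hl
        rw [ih rest [] (cur.reverse :: acc) (by omega)]
        rw [pvSplit_eq_some (show pvPartNl ('\n' :: rest) = some ([], rest) by simp [pvPartNl])]
        cases hps : pvSplit rest with
        | nil => exact absurd hps (pvSplit_ne_nil rest)
        | cons x xs => simp [pvConsHead]
      · rw [PySem.Chars.splitOn.go]
        have hpre : List.isPrefixOf ['\n'] (c :: rest) = false := by
          simp [List.isPrefixOf]
          intro h; exact absurd h.symm hc
        rw [if_neg (by simp [hpre])]
        simp only [List.length_cons] at hl
        rw [ih rest (c :: cur) acc (by omega)]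
        congr 1
        cases hpr : pvPartNl rest with
        | none =>
          rw [pvSplit_eq_none hpr,
            pvSplit_eq_none (show pvPartNl (c :: rest) = none by simp [pvPartNl, hc, hpr])]
          simp [pvConsHead]
        | some p =>
          obtain ⟨h, t⟩ := p
          rw [pvSplit_eq_some hpr,
            pvSplit_eq_some (show pvPartNl (c :: rest) = some (c :: h, t) by
              simp [pvPartNl, hc, hpr])]
          simp [pvConsHead]

theorem pv_splitOn_eq (cs : List Char) :
    PySem.Chars.splitOn cs ['\n'] = pvSplit cs := by
  rw [PySem.Chars.splitOn, pv_go_eq (cs.length + 1) cs [] [] (by omega)]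
  cases hps : pvSplit cs with
  | nil => exact absurd hps (pvSplit_ne_nil cs)
  | cons x xs => simp [pvConsHead]

-- joining the pieces back with '\n' restores the string
theorem pv_join_pvSplit (cs : List Char) :
    PySem.Chars.join ['\n'] (pvSplit cs) = cs := by
  cases hp : pvPartNl cs with
  | none => rw [pvSplit_eq_none hp, PySem.Chars.join_singleton]
  | some p =>
    obtain ⟨h, t⟩ := p
    have hlt := pvPartNl_some_length hp
    rw [pvSplit_eq_some hp]
    have hrec := pv_join_pvSplit t
    cases hps : pvSplit t with
    | nil => exact absurd hps (pvSplit_ne_nil t)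
    | cons x xs =>
      rw [hps] at hrec
      rw [PySem.Chars.join_cons_cons, hrec, pvPartNl_some hp]
      simp
termination_by cs.length

-- the tail of A's loop (indices ≥ 2) just appends the elements unchanged
theorem pv_tail_loop (anns : List String) (rest : List String) (s : Int) (acc : List String)
    (hs : 2 ≤ s) :
    (PySem.List.enumerate rest s).foldl
      (fun (res : List String) (p : Int × String) =>
        if p.1 < ((2 : Nat) : Int) then
          res ++ [pvFmt p.2 (PySem.List.pyGetD anns p.1 "")]
        else
          res ++ [p.2]) acc = acc ++ rest := by
  induction rest generalizing s acc with
  | nil => simp [PySem.List.enumerate_nil]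
  | cons x xs ih =>
    rw [PySem.List.enumerate_cons, List.foldl_cons]
    have h2 : ¬ (s < ((2 : Nat) : Int)) := by push_cast; omega
    rw [if_neg h2, ih (s + 1) _ (by omega)]
    simp

-- A's loop result: the first two lines formatted, the rest verbatim
theorem pv_lines_eq (a1 a2 : String) (lines : List String) :
    (PySem.List.enumerate lines 0).foldl
      (fun (res : List String) (p : Int × String) =>
        if p.1 < (([a1, a2] : List String).length : Int) then
          res ++ [pvFmt p.2 (PySem.List.pyGetD [a1, a2] p.1 "")]
        else
          res ++ [p.2]) [] =
    (lines.zip [a1, a2]).map (fun p => pvFmt p.1 p.2) ++ lines.drop 2 := by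
  have hlen : ([a1, a2] : List String).length = 2 := rfl
  rw [hlen]
  match lines with
  | [] => simp [PySem.List.enumerate_nil]
  | [a] =>
    simp [PySem.List.enumerate_cons, PySem.List.enumerate_nil,
      PySem.List.pyGetD, PySem.List.pyGet?, PySem.List.pyIdx?]
  | a :: b :: rest =>
    rw [PySem.List.enumerate_cons, PySem.List.enumerate_cons, List.foldl_cons, List.foldl_cons]
    rw [pv_tail_loop [a1, a2] rest (0 + 1 + 1) _ (by omega)]
    simp [PySem.List.pyGetD, PySem.List.pyGet?, PySem.List.pyIdx?]

-- on any characters, A's format-join of the split pieces is B's partition recursion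
theorem pv_main (a1 a2 : String) (cs : List Char) :
    PySem.Str.join "\n"
      (((((pvSplit cs).map String.ofList).zip [a1, a2]).map (fun p => pvFmt p.1 p.2))
        ++ ((pvSplit cs).map String.ofList).drop 2) =
    String.ofList (pvGo cs [a1, a2]) := by
  apply String.toList_inj.mp
  have hnl : ("\n" : String).toList = ['\n'] := rfl
  cases hp : pvPartNl cs with
  | none =>
    rw [pvSplit_eq_none hp]
    simp only [List.map_cons, List.map_nil, List.zip_cons_cons, List.zip_nil_right,
      List.drop, List.append_nil, String.toList_ofList]
    rw [PySem.Str.toList_join, hnl]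
    simp [PySem.Chars.join_singleton, pvGo, hp, pvFmt]
  | some p =>
    obtain ⟨h, t⟩ := p
    rw [pvSplit_eq_some hp]
    cases hpt : pvPartNl t with
    | none =>
      rw [pvSplit_eq_none hpt]
      simp only [List.map_cons, List.map_nil, List.zip_cons_cons, List.zip_nil_right,
        List.drop, List.append_nil, String.toList_ofList]
      rw [PySem.Str.toList_join, hnl]
      simp [PySem.Chars.join_cons_cons, PySem.Chars.join_singleton, pvGo, hp, hpt, pvFmt]
    | some q =>
      obtain ⟨h2, t2⟩ := q
      rw [pvSplit_eq_some hpt]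
      cases hps : pvSplit t2 with
      | nil => exact absurd hps (pvSplit_ne_nil t2)
      | cons x xs =>
        have hjoin : PySem.Chars.join ['\n'] (x :: xs) = t2 := by
          rw [← hps]; exact pv_join_pvSplit t2
        simp only [List.map_cons, List.zip_cons_cons, List.zip_nil_right,
          String.toList_ofList]
        rw [PySem.Str.toList_join, hnl]
        simp only [pvGo, hp, hpt, pvFmt]
        simp only [List.map_cons, List.map_nil, List.map_map, String.toList_ofList,
          List.drop_succ_cons, List.drop_zero, List.cons_append, List.nil_append]
        have hmm : List.map (String.toList ∘ String.ofList) xs = xs := by simp [Function.comp_def]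
        rw [hmm, PySem.Chars.join_cons_cons, PySem.Chars.join_cons_cons, hjoin]
        simp

-- ===== VERDICT =====
theorem annotate_pot_py_spec : Claim_equal_annotate_pot_py := by
  intro content _
  unfold Spec_annotate_pot_py annotate_pot_py annotate_pot_py_alt
  simp only [pvAnnotations]
  have hsplit : PySem.Str.split? (PySem.Str.strip content) "\n" =
      some ((pvSplit (PySem.Str.strip content).toList).map String.ofList) := by
    rw [PySem.Str.split?]
    have : ("\n" : String).toList = ['\n'] := rfl
    rw [this, PySem.Chars.split?]
    simp [pv_splitOn_eq]
  rw [hsplit]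
  simp only [Option.getD_some]
  rw [pv_lines_eq]
  exact pv_main _ _ (PySem.Str.strip content).toList
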